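-- pv_equiv track=rewrite | github.com/BrooklinJazz/Algorithms-and-Data-Structures | algorithmic_design_and_techniques/greedy_algorithms.py | has_disjointed
-- ===== SOURCE A (Python) =====
-- def has_disjointed(marks, segments):
--     disjointed = False
--
--     def no_marks_between_segment(segment):
--         result = True
--         for m in marks:
--             if segment[0] <= m and segment[1] >= m:
--                 result = False
--         return result
--
--     for s in segments:
--         if no_marks_between_segment(s):
--             disjointed = True
--     return disjointed
-- ===== SOURCE B (Python) =====
-- def has_disjointed(marks, segments):
--     ms = sorted(marks)
--     n = len(ms)
--     for s in segments:
--         x = s[0]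
--         lo, hi = 0, n
--         while lo < hi:
--             mid = (lo + hi) // 2
--             if ms[mid] < x:
--                 lo = mid + 1
--             else:
--                 hi = mid
--         if lo == n or ms[lo] > s[1]:
--             return True
--     return False
-- ===== Notes on version B (the rewrite author's own statement) =====
-- stated objective: faster
-- what changed: B sorts the marks once and binary-searches (hand-written bisect_left) each segment's left endpoint instead of A's scan of every mark for every segment, and returns early at the first markless segment.
-- outside the precondition, e.g. on has_disjointed([], [()]): A returns True, B raises IndexError
import Mathlib
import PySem

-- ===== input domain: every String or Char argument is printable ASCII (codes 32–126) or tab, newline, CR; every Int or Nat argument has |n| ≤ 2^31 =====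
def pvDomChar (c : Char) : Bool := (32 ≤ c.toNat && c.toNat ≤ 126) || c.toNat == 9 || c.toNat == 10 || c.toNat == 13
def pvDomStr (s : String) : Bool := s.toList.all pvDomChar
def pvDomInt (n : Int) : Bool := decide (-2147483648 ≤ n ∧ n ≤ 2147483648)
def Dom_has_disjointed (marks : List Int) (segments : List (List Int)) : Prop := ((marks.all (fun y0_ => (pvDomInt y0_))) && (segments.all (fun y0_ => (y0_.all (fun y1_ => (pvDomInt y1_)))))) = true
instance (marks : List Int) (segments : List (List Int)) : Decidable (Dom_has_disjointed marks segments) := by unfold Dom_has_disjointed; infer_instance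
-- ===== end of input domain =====

-- B replaces A's nested scan of all marks per segment by sorting the marks once and
-- binary-searching each segment's range (asymptotically faster; exact same result).


-- ===== PORT A =====
-- inner helper 'no_marks_between_segment' of A (closure over marks)
def pvNoMarksBetween (marks : List Int) (segment : List Int) : Bool :=
  marks.foldl (fun result m =>
    match PySem.List.pyGet? segment 0 with
    | none => result      -- Python raises IndexError on segment[0]; outside Pre_
    | some s0 =>
      if s0 ≤ m then      -- 'and' short-circuits: segment[1] only read when s0 ≤ m
        match PySem.List.pyGet? segment 1 with
        | none => result  -- Python raises IndexError on segment[1]; outside Pre_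
        | some s1 => if s1 ≥ m then false else result
      else result
  ) true

def has_disjointed (marks : List Int) (segments : List (List Int)) : Bool :=
  segments.foldl (fun disjointed s =>
    if pvNoMarksBetween marks s then true else disjointed) false

-- ===== PORT B =====
-- the hand-written bisect_left while-loop of Source B (state lo, hi)
-- fuel = hi - lo makes the loop structural (kernel-reducible); it never runs out
def pvBisectGo (ms : List Int) (x : Int) : Nat → Nat → Nat → Nat
  | 0, lo, _ => lo
  | fuel + 1, lo, hi =>
    if lo < hi then
      let mid := (lo + hi) / 2
      if ms.getD mid 0 < x then pvBisectGo ms x fuel (mid + 1) hi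
      else pvBisectGo ms x fuel lo mid
    else lo

def pvBisect (ms : List Int) (x : Int) (lo hi : Nat) : Nat :=
  pvBisectGo ms x (hi - lo) lo hi

-- Source B's 'for s in segments' loop with its early returns
def pvAltLoop (ms : List Int) (n : Nat) (segments : List (List Int)) : Bool :=
  match segments with
  | [] => false
  | s :: rest =>
    match PySem.List.pyGet? s 0 with
    | none => false      -- Python raises IndexError on s[0]; outside Pre_
    | some x =>
      let lo := pvBisect ms x 0 n
      if lo = n then true
      else
        match PySem.List.pyGet? s 1 with
        | none => false  -- Python raises IndexError on s[1]; outside Pre_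
        | some s1 => if ms.getD lo 0 > s1 then true else pvAltLoop ms n rest

def has_disjointed_alt (marks : List Int) (segments : List (List Int)) : Bool :=
  let ms := PySem.List.sorted marks (fun m => m)
  pvAltLoop ms ms.length segments

-- ===== PRECONDITION & SPEC =====
-- Pre_ excludes inputs on which an IndexError is reached: a segment with one endpoint
-- and some mark ≥ it (A's short-circuited 'and' reads segment[1]; B also raises), or an
-- empty segment that both programs index (B raises there; A raises too unless its
-- indexing happens never to be reached, where its accidental return is unmatchable).
def Pre_has_disjointed (marks : List Int) (segments : List (List Int)) : Prop :=
  if marks = [] then (segments = [] ∨ 1 ≤ (segments.headD []).length)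
  else ∀ s ∈ segments, 2 ≤ s.length ∨ (s.length = 1 ∧ ∀ m ∈ marks, m < s.headD 0)
instance (marks : List Int) (segments : List (List Int)) : Decidable (Pre_has_disjointed marks segments) := by unfold Pre_has_disjointed; infer_instance
def pvWitness_has_disjointed : List Int × List (List Int) := ([1, 5], [[2, 3], [6, 7]])

def Spec_has_disjointed (marks : List Int) (segments : List (List Int)) (out : Bool) : Prop := out = has_disjointed_alt marks segments
instance (marks : List Int) (segments : List (List Int)) (out : Bool) : Decidable (Spec_has_disjointed marks segments out) := by unfold Spec_has_disjointed; infer_instance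

-- ===== CLAIM (what is proved, stated in full; the proofs are below) =====
def Claim_equal_has_disjointed : Prop := ∀ (marks : List Int) (segments : List (List Int)), Dom_has_disjointed marks segments → Pre_has_disjointed marks segments → Spec_has_disjointed marks segments (has_disjointed marks segments)

-- ===== LEMMAS AND PROOFS =====

-- A's inner loop: a fold with a sticky False flag is the negation of 'any'
theorem pv_foldl_flag_false (p : Int → Prop) [DecidablePred p] (ms : List Int) :
    ∀ b : Bool, ms.foldl (fun r m => if p m then false else r) b
      = (b && !ms.any (fun m => decide (p m))) := by
  induction ms with
  | nil => intro b; simp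
  | cons m t ih =>
      intro b
      simp only [List.foldl_cons, List.any_cons, ih]
      by_cases h : p m <;> simp [h]

-- A's outer loop: a fold with a sticky True flag is 'any'
theorem pv_foldl_flag_true (q : List Int → Bool) (ss : List (List Int)) :
    ∀ b : Bool, ss.foldl (fun d s => if q s then true else d) b = (b || ss.any q) := by
  induction ss with
  | nil => intro b; simp
  | cons s t ih =>
      intro b
      simp only [List.foldl_cons, List.any_cons, ih]
      by_cases h : q s <;> simp [h]

theorem pv_noMarks_eq (marks : List Int) (s0 s1 : Int) (seg : List Int)
    (h0 : PySem.List.pyGet? seg 0 = some s0) (h1 : PySem.List.pyGet? seg 1 = some s1) :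
    pvNoMarksBetween marks seg = !marks.any (fun m => decide (s0 ≤ m ∧ m ≤ s1)) := by
  unfold pvNoMarksBetween
  rw [h0, h1]
  have hbody : (fun (result : Bool) (m : Int) =>
      if s0 ≤ m then (if s1 ≥ m then false else result) else result)
      = (fun (result : Bool) (m : Int) => if s0 ≤ m ∧ s1 ≥ m then false else result) := by
    funext r m
    by_cases ha : s0 ≤ m <;> by_cases hb : s1 ≥ m <;> simp [ha, hb]
  rw [hbody, pv_foldl_flag_false (fun m => s0 ≤ m ∧ s1 ≥ m) marks true]
  simp only [Bool.true_and]

-- a fold whose step fixes every list element is the identity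
theorem pv_foldl_id {α : Type} (f : Bool → α → Bool) (ms : List α)
    (h : ∀ r, ∀ m ∈ ms, f r m = r) : ∀ b, ms.foldl f b = b := by
  induction ms with
  | nil => intro b; simp
  | cons m t ih =>
      intro b
      rw [List.foldl_cons, h b m List.mem_cons_self]
      exact ih (fun r u hu => h r u (List.mem_cons_of_mem _ hu)) b

-- a one-endpoint segment above all marks: A's scan keeps True
theorem pv_noMarks_single (marks : List Int) (a : Int) (hm : ∀ m ∈ marks, m < a) :
    pvNoMarksBetween marks [a] = true := by
  unfold pvNoMarksBetween
  apply pv_foldl_id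
  intro r m hmem
  have h0 : PySem.List.pyGet? [a] (0 : Int) = some a := PySem.List.pyGet?_zero_cons a []
  rw [h0]
  show (if a ≤ m then
      (match PySem.List.pyGet? [a] (1 : Int) with
        | none => r
        | some s1 => if s1 ≥ m then false else r)
    else r) = r
  rw [if_neg (by have := hm m hmem; omega)]

-- monotonicity of getD on a (≤)-sorted list
theorem pv_getD_mono (ms : List Int) (hs : ms.Pairwise (· ≤ ·))
    {i j : Nat} (hij : i ≤ j) (hj : j < ms.length) :
    ms.getD i 0 ≤ ms.getD j 0 := by
  rcases eq_or_lt_of_le hij with rfl | hlt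
  · exact le_refl _
  · rw [List.getD_eq_getElem ms 0 (lt_of_le_of_lt hij hj), List.getD_eq_getElem ms 0 hj]
    exact (List.pairwise_iff_getElem.mp hs) i j _ _ hlt

-- invariant of the hand-written bisect_left loop
theorem pvBisectGo_spec (ms : List Int) (x : Int) (hs : ms.Pairwise (· ≤ ·)) :
    ∀ fuel lo hi, hi - lo ≤ fuel → hi ≤ ms.length → lo ≤ hi →
      (∀ j, j < lo → ms.getD j 0 < x) →
      (∀ j, hi ≤ j → j < ms.length → x ≤ ms.getD j 0) →
      lo ≤ pvBisectGo ms x fuel lo hi ∧ pvBisectGo ms x fuel lo hi ≤ hi ∧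
      (∀ j, j < pvBisectGo ms x fuel lo hi → ms.getD j 0 < x) ∧
      (∀ j, pvBisectGo ms x fuel lo hi ≤ j → j < ms.length → x ≤ ms.getD j 0) := by
  intro fuel
  induction fuel with
  | zero =>
      intro lo hi hf hhi hlh hlow hhigh
      have heq : lo = hi := by omega
      subst heq
      exact ⟨le_refl _, le_refl _, hlow, hhigh⟩
  | succ f ih =>
      intro lo hi hf hhi hlh hlow hhigh
      by_cases h : lo < hi
      · have hmid2 : lo ≤ (lo + hi) / 2 ∧ (lo + hi) / 2 < hi := by omega
        by_cases hm : ms.getD ((lo + hi) / 2) 0 < x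
        · have hgo : pvBisectGo ms x (f + 1) lo hi = pvBisectGo ms x f ((lo + hi) / 2 + 1) hi := by
            simp only [pvBisectGo, if_pos h, if_pos hm]
          rw [hgo]
          have key := ih ((lo + hi) / 2 + 1) hi (by omega) hhi (by omega)
            (by
              intro j hj
              have h2 : ms.getD j 0 ≤ ms.getD ((lo + hi) / 2) 0 :=
                pv_getD_mono ms hs (by omega) (by omega)
              omega)
            hhigh
          exact ⟨by omega, key.2.1, key.2.2.1, key.2.2.2⟩
        · have hgo : pvBisectGo ms x (f + 1) lo hi = pvBisectGo ms x f lo ((lo + hi) / 2) := by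
            simp only [pvBisectGo, if_pos h, if_neg hm]
          rw [hgo]
          have key := ih lo ((lo + hi) / 2) (by omega) (by omega) (by omega) hlow
            (by
              intro j hj hjl
              have h2 : ms.getD ((lo + hi) / 2) 0 ≤ ms.getD j 0 := pv_getD_mono ms hs hj hjl
              omega)
          exact ⟨key.1, by omega, key.2.2.1, key.2.2.2⟩
      · have hgo : pvBisectGo ms x (f + 1) lo hi = lo := by
          simp only [pvBisectGo, if_neg h]
        rw [hgo]
        have heq : lo = hi := by omega
        subst heq
        exact ⟨le_refl _, le_refl _, hlow, hhigh⟩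

theorem pvBisect_spec (ms : List Int) (x : Int) (hs : ms.Pairwise (· ≤ ·)) :
    ∀ lo hi, hi ≤ ms.length → lo ≤ hi →
      (∀ j, j < lo → ms.getD j 0 < x) →
      (∀ j, hi ≤ j → j < ms.length → x ≤ ms.getD j 0) →
      lo ≤ pvBisect ms x lo hi ∧ pvBisect ms x lo hi ≤ hi ∧
      (∀ j, j < pvBisect ms x lo hi → ms.getD j 0 < x) ∧
      (∀ j, pvBisect ms x lo hi ≤ j → j < ms.length → x ≤ ms.getD j 0) := by
  intro lo hi hhi hlh hlow hhigh
  exact pvBisectGo_spec ms x hs (hi - lo) lo hi (le_refl _) hhi hlh hlow hhigh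

-- the binary-search test on the full sorted list decides 'no mark in [s0, s1]'
theorem pv_segment_eq (ms : List Int) (hs : ms.Pairwise (· ≤ ·)) (s0 s1 : Int) :
    (pvBisect ms s0 0 ms.length = ms.length ∨
      (pvBisect ms s0 0 ms.length ≠ ms.length ∧ s1 < ms.getD (pvBisect ms s0 0 ms.length) 0))
    ↔ ¬ ∃ m ∈ ms, s0 ≤ m ∧ m ≤ s1 := by
  obtain ⟨h1, h2, h3, h4⟩ := pvBisect_spec ms s0 hs 0 ms.length (le_refl _) (Nat.zero_le _)
    (fun j hj => absurd hj (Nat.not_lt_zero j)) (fun j hj hjl => absurd hjl (by omega))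
  set lo := pvBisect ms s0 0 ms.length with hlo
  constructor
  · rintro (hend | ⟨hne, hgt⟩)
    · rintro ⟨m, hm, hle, _⟩
      obtain ⟨j, hjl, rfl⟩ := List.getElem_of_mem hm
      have := h3 j (by omega)
      rw [List.getD_eq_getElem ms 0 hjl] at this
      omega
    · rintro ⟨m, hm, hle, hle2⟩
      obtain ⟨j, hjl, rfl⟩ := List.getElem_of_mem hm
      by_cases hj : j < lo
      · have := h3 j hj
        rw [List.getD_eq_getElem ms 0 hjl] at this
        omega
      · have hmono : ms.getD lo 0 ≤ ms.getD j 0 := pv_getD_mono ms hs (by omega) hjl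
        rw [List.getD_eq_getElem ms 0 hjl] at hmono
        omega
  · intro hno
    by_cases hend : lo = ms.length
    · exact Or.inl hend
    · refine Or.inr ⟨hend, ?_⟩
      have hlt : lo < ms.length := by omega
      have hx := h4 lo (le_refl _) hlt
      by_contra hle
      push_neg at hle
      exact hno ⟨ms.getD lo 0, by rw [List.getD_eq_getElem ms 0 hlt]; exact List.getElem_mem hlt, hx, hle⟩

-- per-segment agreement, folded over the segment list
theorem pv_loop_eq (marks : List Int) :
    ∀ segments : List (List Int),
      (∀ s ∈ segments, 2 ≤ s.length ∨ (s.length = 1 ∧ ∀ m ∈ marks, m < s.headD 0)) →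
      pvAltLoop (PySem.List.sorted marks (fun m => m))
        (PySem.List.sorted marks (fun m => m)).length segments
      = segments.any (pvNoMarksBetween marks) := by
  have hs : (PySem.List.sorted marks (fun m => m)).Pairwise (· ≤ ·) :=
    PySem.List.sorted_pairwise marks (fun m => m)
  have hperm := PySem.List.sorted_perm marks (fun m => m) false
  set ms := PySem.List.sorted marks (fun m => m) with hms
  intro segments
  induction segments with
  | nil => intro _; rfl
  | cons s rest ih =>
      intro hpre
      rcases hpre s List.mem_cons_self with h2 | ⟨hlen1, hup⟩
      case inr =>
        -- one-endpoint segment [a] with every mark below a: both sides report it markless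
        match s, hlen1, hup with
        | [a], _, hup =>
          have h0 : PySem.List.pyGet? [a] (0 : Int) = some a := PySem.List.pyGet?_zero_cons a []
          rw [pvAltLoop, h0]
          have hlon : pvBisect ms a 0 ms.length = ms.length := by
            obtain ⟨-, hle, -, h4⟩ := pvBisect_spec ms a hs 0 ms.length (le_refl _)
              (Nat.zero_le _) (fun j hj => absurd hj (Nat.not_lt_zero j))
              (fun j hj hjl => absurd hjl (by omega))
            by_contra hne
            have hlt : pvBisect ms a 0 ms.length < ms.length := by omega
            have hx := h4 _ (le_refl _) hlt
            have hmem : ms.getD (pvBisect ms a 0 ms.length) 0 ∈ ms := by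
              rw [List.getD_eq_getElem ms 0 hlt]
              exact List.getElem_mem hlt
            have := hup _ (hperm.mem_iff.mp hmem)
            simp only [List.headD_cons] at this
            omega
          show (if pvBisect ms a 0 ms.length = ms.length then true
              else match PySem.List.pyGet? [a] (1 : Int) with
                | none => false
                | some s1 => if ms.getD (pvBisect ms a 0 ms.length) 0 > s1 then true
                             else pvAltLoop ms ms.length rest)
            = ([a] :: rest).any (pvNoMarksBetween marks)
          rw [if_pos hlon]
          simp only [List.any_cons, pv_noMarks_single marks a
            (by intro m hm; simpa using hup m hm), Bool.true_or]
      match s, h2 with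
      | a :: b :: t, _ =>
        have h0 : PySem.List.pyGet? (a :: b :: t) (0 : Int) = some a := PySem.List.pyGet?_zero_cons a (b :: t)
        have h1 : PySem.List.pyGet? (a :: b :: t) (1 : Int) = some b := by
          simpa using PySem.List.pyGet?_ofNat (xs := a :: b :: t) 1 (by simp)
        rw [pvAltLoop, h0]
        simp only [List.any_cons]
        rw [ih (fun u hu => hpre u (List.mem_cons_of_mem _ hu))]
        rw [pv_noMarks_eq marks a b (a :: b :: t) h0 h1]
        have hany : (marks.any (fun m => decide (a ≤ m ∧ m ≤ b)))
            = (ms.any (fun m => decide (a ≤ m ∧ m ≤ b))) := by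
          rw [Bool.eq_iff_iff, List.any_eq_true, List.any_eq_true]
          exact ⟨fun ⟨m, hm, hp⟩ => ⟨m, hperm.mem_iff.mpr hm, hp⟩,
                 fun ⟨m, hm, hp⟩ => ⟨m, hperm.mem_iff.mp hm, hp⟩⟩
        by_cases hc : ∃ m ∈ ms, a ≤ m ∧ m ≤ b
        · have hnot := (not_iff_not.mpr (pv_segment_eq ms hs a b)).mpr (not_not.mpr hc)
          push_neg at hnot
          obtain ⟨hne, hle⟩ := hnot
          have hle' := hle hne
          have hms1 : ms.any (fun m => decide (a ≤ m ∧ m ≤ b)) = true := by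
            rw [List.any_eq_true]
            obtain ⟨m, hm, hp⟩ := hc
            exact ⟨m, hm, by simpa using hp⟩
          rw [hany, hms1, h1]
          simp only [Bool.not_true, Bool.false_or]
          rw [if_neg hne]
          show (if ms.getD (pvBisect ms a 0 ms.length) 0 > b then true
                else rest.any (pvNoMarksBetween marks)) = rest.any (pvNoMarksBetween marks)
          rw [if_neg (not_lt.mpr hle')]
        · have hd := (pv_segment_eq ms hs a b).mpr hc
          have hms0 : ms.any (fun m => decide (a ≤ m ∧ m ≤ b)) = false := by
            rw [Bool.eq_false_iff, Ne, List.any_eq_true]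
            intro ⟨m, hm, hp⟩
            exact hc ⟨m, hm, by simpa using hp⟩
          rw [hany, hms0, h1]
          simp only [Bool.not_false, Bool.true_or]
          rcases hd with he | ⟨hne, hgt⟩
          · rw [if_pos he]
          · rw [if_neg hne]
            show (if ms.getD (pvBisect ms a 0 ms.length) 0 > b then true
                  else rest.any (pvNoMarksBetween marks)) = true
            rw [if_pos hgt]

-- ===== VERDICT (by name: the statement is the Claim_ definition above) =====
theorem has_disjointed_spec : Claim_equal_has_disjointed := by
  intro marks segments _ hpre
  unfold Spec_has_disjointed has_disjointed has_disjointed_alt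
  rw [pv_foldl_flag_true (pvNoMarksBetween marks) segments false]
  simp only [Bool.false_or]
  by_cases hm : marks = []
  · subst hm
    rw [Pre_has_disjointed, if_pos rfl] at hpre
    rcases hpre with rfl | hlen
    · rfl
    · match segments, hlen with
      | (a :: t) :: rest, _ =>
        have hms0 : PySem.List.sorted ([] : List Int) (fun m => m) = [] :=
          (PySem.List.sorted_perm ([] : List Int) (fun m => m) false).eq_nil
        rw [hms0]
        symm
        have h0 : PySem.List.pyGet? (a :: t) (0 : Int) = some a :=
          PySem.List.pyGet?_zero_cons a t
        rw [pvAltLoop, h0]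
        show (if pvBisect [] a 0 (List.length ([] : List Int)) = List.length ([] : List Int)
            then true
            else match PySem.List.pyGet? (a :: t) (1 : Int) with
              | none => false
              | some s1 => if List.getD ([] : List Int) (pvBisect [] a 0 (List.length ([] : List Int))) 0 > s1 then true
                           else pvAltLoop [] (List.length ([] : List Int)) rest)
          = ((a :: t) :: rest).any (pvNoMarksBetween [])
        rw [if_pos (show pvBisect [] a 0 (List.length ([] : List Int))
              = List.length ([] : List Int) from rfl)]
        simp [pvNoMarksBetween]
  · rw [Pre_has_disjointed, if_neg hm] at hpre
    exact (pv_loop_eq marks segments hpre).symm
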